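-- pv_equiv track=rewrite | github.com/RAAZ-ID/Tubes-AKA-Intertement-Creative | AKA TUBES.py | hitung_kapital_rekursif
-- ===== SOURCE A (Python) =====
-- def hitung_kapital_rekursif(teks, n):
--
--     if n == 0:
--
--         return 0
--
--     karakter = teks[n-1]
--
--     if 'A' <= karakter <= 'Z':
--
--         tambah = 1
--
--     else:
--
--         tambah = 0
--
--     return tambah + hitung_kapital_rekursif(teks, n - 1)
-- ===== SOURCE B (Python) =====
-- def hitung_kapital_rekursif(teks, n):
--     count = 0
--     while n != 0:
--         if 'A' <= teks[n-1] <= 'Z':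
--             count += 1
--         n -= 1
--     return count
-- ===== Notes on version B (the rewrite author's own statement) =====
-- stated objective: alternative
-- what changed: Replaces the n-deep recursion with an iterative while-loop and an accumulator, walking the same indices n-1..0 downward.
import Mathlib
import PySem

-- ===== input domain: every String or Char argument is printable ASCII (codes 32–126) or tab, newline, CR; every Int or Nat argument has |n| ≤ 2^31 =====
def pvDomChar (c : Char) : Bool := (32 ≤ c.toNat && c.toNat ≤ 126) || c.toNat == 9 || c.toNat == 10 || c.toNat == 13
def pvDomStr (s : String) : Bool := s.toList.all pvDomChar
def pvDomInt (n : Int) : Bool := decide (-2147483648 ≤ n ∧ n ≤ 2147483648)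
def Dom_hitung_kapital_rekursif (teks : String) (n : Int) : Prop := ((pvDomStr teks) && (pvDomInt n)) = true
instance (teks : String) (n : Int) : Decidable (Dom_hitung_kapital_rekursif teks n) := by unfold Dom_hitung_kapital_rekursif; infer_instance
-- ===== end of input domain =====

-- B replaces A's n-deep recursion by an iterative accumulator loop over the same downward indices (alternative decomposition).


-- ===== PORT A =====
-- Literal port of A's recursion. `teks[n-1]` is PySem.Str.pyGet?; `none` = IndexError, excluded by Pre_.
-- The `n < 0` branch is a totality guard only: there Python never returns (it recurses until IndexError), outside Pre_.
def hitung_kapital_rekursif (teks : String) (n : Int) : Int :=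
  if n = 0 then 0
  else if n < 0 then 0  -- totality guard; Python raises here (outside Pre_)
  else
    let karakter := (PySem.Str.pyGet? teks (n - 1)).getD ' '
    let tambah : Int := if 'A' ≤ karakter ∧ karakter ≤ 'Z' then 1 else 0
    tambah + hitung_kapital_rekursif teks (n - 1)
termination_by n.toNat
decreasing_by omega

-- ===== PORT B =====
-- The while-loop of Source B: state (n, count); loop body tests teks[n-1], bumps count, decrements n.
-- The `n < 0` branch is a totality guard only: there Python's loop never returns (IndexError), outside Pre_.
def hitung_kapital_rekursif_altLoop (teks : String) (n : Int) (count : Int) : Int :=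
  if n = 0 then count
  else if n < 0 then count  -- totality guard; Python raises here (outside Pre_)
  else
    let count' := if ('A' ≤ (PySem.Str.pyGet? teks (n - 1)).getD ' ' ∧ (PySem.Str.pyGet? teks (n - 1)).getD ' ' ≤ 'Z')
                  then count + 1 else count
    hitung_kapital_rekursif_altLoop teks (n - 1) count'
termination_by n.toNat
decreasing_by omega

def hitung_kapital_rekursif_alt (teks : String) (n : Int) : Int :=
  hitung_kapital_rekursif_altLoop teks n 0

-- ===== PRECONDITION & SPEC =====
-- Pre_: exactly where the Python A returns: 0 ≤ n ≤ len(teks) (otherwise teks[n-1] eventually raises IndexError).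
def Pre_hitung_kapital_rekursif (teks : String) (n : Int) : Prop :=
  0 ≤ n ∧ n ≤ (PySem.Str.len teks : Int)
instance (teks : String) (n : Int) : Decidable (Pre_hitung_kapital_rekursif teks n) := by
  unfold Pre_hitung_kapital_rekursif; infer_instance

def pvWitness_hitung_kapital_rekursif : String × Int := ("Hello World", 8)

def Spec_hitung_kapital_rekursif (teks : String) (n : Int) (out : Int) : Prop := out = hitung_kapital_rekursif_alt teks n
instance (teks : String) (n : Int) (out : Int) : Decidable (Spec_hitung_kapital_rekursif teks n out) := by unfold Spec_hitung_kapital_rekursif; infer_instance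

-- ===== CLAIM (what is proved, stated in full; the proofs are below) =====
def Claim_equal_hitung_kapital_rekursif : Prop := ∀ (teks : String) (n : Int), Dom_hitung_kapital_rekursif teks n → Pre_hitung_kapital_rekursif teks n → Spec_hitung_kapital_rekursif teks n (hitung_kapital_rekursif teks n)

-- ===== LEMMAS AND PROOFS =====
lemma altLoop_eq_add (teks : String) :
    ∀ (k : Nat) (count : Int),
      hitung_kapital_rekursif_altLoop teks (k : Int) count
        = count + hitung_kapital_rekursif teks (k : Int) := by
  intro k
  induction k with
  | zero => intro count; simp [hitung_kapital_rekursif_altLoop, hitung_kapital_rekursif]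
  | succ m ih =>
      intro count
      have h0 : ((m + 1 : Nat) : Int) ≠ 0 := by omega
      have h1 : ¬ ((m + 1 : Nat) : Int) < 0 := by omega
      have h2 : ((m + 1 : Nat) : Int) - 1 = (m : Int) := by omega
      rw [hitung_kapital_rekursif_altLoop, hitung_kapital_rekursif]
      simp only [h0, h1, h2, if_false]
      split_ifs with hc
      · rw [ih]; ring
      · rw [ih]; ring

-- ===== VERDICT (by name: the statement is the Claim_ definition above) =====
theorem hitung_kapital_rekursif_spec : Claim_equal_hitung_kapital_rekursif := by
  intro teks n _ hpre
  obtain ⟨hn, _⟩ := hpre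
  obtain ⟨k, rfl⟩ : ∃ k : Nat, n = (k : Int) := ⟨n.toNat, (Int.toNat_of_nonneg hn).symm⟩
  unfold Spec_hitung_kapital_rekursif hitung_kapital_rekursif_alt
  rw [altLoop_eq_add teks k 0, zero_add]
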